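-- pv_equiv track=rewrite | github.com/taheri-az/Decentralized-TL-Exploration | experiment/ready_on_robot/client_helper.py | find_shortest_path_to_accepting
-- ===== SOURCE A (Python) =====
-- from collections import deque
--
-- def find_shortest_path_to_accepting(current_product_state, accepting_dfa_states, transitions):
--     """
--     Find the shortest path from current product state to any accepting DFA state.
--
--     Parameters
--     ----------
--     current_product_state : tuple
--         (physical_state, dfa_state)
--     accepting_dfa_states : set
--         Accepting DFA states (e.g., {'accept_all'})
--     transitions : dict
--         Product transitions: (v, q) -> list of (v', q')
--
--     Returns
--     -------
--     path : list or None
--         List of product states forming the path, or None if unreachable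
--     """
--
--     queue = deque()
--     queue.append(current_product_state)
--
--     parent = {current_product_state: None}
--     visited = set([current_product_state])
--
--     while queue:
--         current = queue.popleft()
--         _, q = current
--
--         # Check acceptance
--         if q in accepting_dfa_states:
--             # Reconstruct path
--             path = []
--             while current is not None:
--                 path.append(current)
--                 current = parent[current]
--             return path[::-1]
--
--         for nxt in transitions.get(current, []):
--             if nxt not in visited:
--                 visited.add(nxt)
--                 parent[nxt] = current
--                 queue.append(nxt)
--
--     return None
-- ===== SOURCE B (Python) =====
-- from collections import deque
--
-- def find_shortest_path_to_accepting(current_product_state, accepting_dfa_states, transitions):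
--     queue = deque([(current_product_state, [current_product_state])])
--     visited = {current_product_state}
--     while queue:
--         node, path = queue.popleft()
--         if node[1] in accepting_dfa_states:
--             return path
--         for nxt in transitions.get(node, []):
--             if nxt not in visited:
--                 visited.add(nxt)
--                 queue.append((nxt, path + [nxt]))
--     return None
-- ===== Notes on version B (the rewrite author's own statement) =====
-- stated objective: simpler
-- what changed: BFS carries the full path-so-far with each queued node, so the parent dictionary and the backwards path-reconstruction loop of A disappear entirely.
import Mathlib
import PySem

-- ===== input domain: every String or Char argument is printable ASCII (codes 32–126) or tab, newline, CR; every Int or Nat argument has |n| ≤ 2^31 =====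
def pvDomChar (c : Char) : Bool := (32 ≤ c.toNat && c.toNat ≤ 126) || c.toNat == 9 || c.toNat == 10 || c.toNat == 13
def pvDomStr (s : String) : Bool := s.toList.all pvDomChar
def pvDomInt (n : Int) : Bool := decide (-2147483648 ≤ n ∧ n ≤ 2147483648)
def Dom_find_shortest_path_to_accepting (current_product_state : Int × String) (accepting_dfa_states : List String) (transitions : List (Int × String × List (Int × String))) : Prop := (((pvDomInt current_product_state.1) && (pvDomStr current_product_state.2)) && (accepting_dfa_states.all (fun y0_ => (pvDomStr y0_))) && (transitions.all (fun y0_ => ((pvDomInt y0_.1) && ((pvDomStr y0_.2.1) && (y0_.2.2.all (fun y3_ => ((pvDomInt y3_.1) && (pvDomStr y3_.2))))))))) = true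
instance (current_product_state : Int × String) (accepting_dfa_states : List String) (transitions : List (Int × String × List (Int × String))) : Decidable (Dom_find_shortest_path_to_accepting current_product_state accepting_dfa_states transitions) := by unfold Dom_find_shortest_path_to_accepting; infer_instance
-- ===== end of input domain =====

-- B drops A's parent dictionary and backwards reconstruction: the BFS queue carries the
-- full path with each node (objective: simpler). Return values only; neither mutates inputs.

-- shared helper: transitions.get(key, [])  (dict lookup = first match in the association list)
def pvTransGet (ts : List (Int × String × List (Int × String))) (k : Int × String) : List (Int × String) :=
  match ts with
  | [] => []
  | (v, q, ns) :: rest => if v = k.1 ∧ q = k.2 then ns else pvTransGet rest k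

-- fuel: each loop iteration pops one queue entry; entries are enqueued at most
-- 1 + (total number of listed successors) times, so this bound is never reached.
def pvFuel (ts : List (Int × String × List (Int × String))) : Nat :=
  (ts.map (fun t => t.2.2.length)).sum + 2

-- ===== PORT A =====
-- A's reconstruction: while current is not None: path.append(current); current = parent[current]
-- (fuel-guarded; the chain is always inside parent, so the guard and the .getD never fire on a run)
def pvBuildPath (parent : PySem.Dict (Int × String) (Option (Int × String))) :
    Nat → Option (Int × String) → List (Int × String) → List (Int × String)
  | _, none, path => path
  | 0, some _, path => path
  | fuel+1, some cur, path => pvBuildPath parent fuel ((parent.get? cur).getD none) (path ++ [cur])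

def pvLoopA (accepting : List String) (ts : List (Int × String × List (Int × String))) :
    Nat → List (Int × String) → PySem.Dict (Int × String) (Option (Int × String)) →
    PySem.Set (Int × String) → Option (List (Int × String))
  | 0, _, _, _ => none
  | fuel+1, queue, parent, visited =>
    match queue with
    | [] => none
    | current :: rest =>
      if accepting.contains current.2 then
        some ((pvBuildPath parent (parent.size + 1) (some current) []).reverse)
      else
        let st := (pvTransGet ts current).foldl
          (fun st nxt =>
            if PySem.Set.contains st.2.2 nxt then st
            else (st.1 ++ [nxt], st.2.1.insert nxt (some current), PySem.Set.add st.2.2 nxt))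
          (rest, parent, visited)
        pvLoopA accepting ts fuel st.1 st.2.1 st.2.2

def find_shortest_path_to_accepting (current_product_state : Int × String) (accepting_dfa_states : List String) (transitions : List (Int × String × List (Int × String))) : Option (List (Int × String)) :=
  pvLoopA accepting_dfa_states transitions (pvFuel transitions)
    [current_product_state]
    (PySem.Dict.empty.insert current_product_state none)
    (PySem.Set.ofList [current_product_state])

-- ===== PORT B =====
def pvLoopB (accepting : List String) (ts : List (Int × String × List (Int × String))) :
    Nat → List ((Int × String) × List (Int × String)) → PySem.Set (Int × String) →
    Option (List (Int × String))
  | 0, _, _ => none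
  | fuel+1, queue, visited =>
    match queue with
    | [] => none
    | (node, path) :: rest =>
      if accepting.contains node.2 then some path
      else
        let st := (pvTransGet ts node).foldl
          (fun st nxt =>
            if PySem.Set.contains st.2 nxt then st
            else (st.1 ++ [(nxt, path ++ [nxt])], PySem.Set.add st.2 nxt))
          (rest, visited)
        pvLoopB accepting ts fuel st.1 st.2

def find_shortest_path_to_accepting_alt (current_product_state : Int × String) (accepting_dfa_states : List String) (transitions : List (Int × String × List (Int × String))) : Option (List (Int × String)) :=
  pvLoopB accepting_dfa_states transitions (pvFuel transitions)
    [(current_product_state, [current_product_state])]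
    (PySem.Set.ofList [current_product_state])

-- ===== PRECONDITION & SPEC =====
def Spec_find_shortest_path_to_accepting (current_product_state : Int × String) (accepting_dfa_states : List String) (transitions : List (Int × String × List (Int × String))) (out : Option (List (Int × String))) : Prop := out = find_shortest_path_to_accepting_alt current_product_state accepting_dfa_states transitions
instance (current_product_state : Int × String) (accepting_dfa_states : List String) (transitions : List (Int × String × List (Int × String))) (out : Option (List (Int × String))) : Decidable (Spec_find_shortest_path_to_accepting current_product_state accepting_dfa_states transitions out) := by unfold Spec_find_shortest_path_to_accepting; infer_instance

-- ===== CLAIM (what is proved, stated in full; the proofs are below) =====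
def Claim_equal_find_shortest_path_to_accepting : Prop := ∀ (current_product_state : Int × String) (accepting_dfa_states : List String) (transitions : List (Int × String × List (Int × String))), Dom_find_shortest_path_to_accepting current_product_state accepting_dfa_states transitions → Spec_find_shortest_path_to_accepting current_product_state accepting_dfa_states transitions (find_shortest_path_to_accepting current_product_state accepting_dfa_states transitions)

-- ===== LEMMAS AND PROOFS =====

-- the parent-chain of A, as a relation: PvChain parent x p ↔ following parent from x
-- (ending at the root, whose parent is None) spells out the path p from the root to x
inductive PvChain (parent : PySem.Dict (Int × String) (Option (Int × String))) :
    (Int × String) → List (Int × String) → Prop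
  | root (x : Int × String) (h : parent.get? x = some none) : PvChain parent x [x]
  | step (x y : Int × String) (p : List (Int × String))
      (h : parent.get? x = some (some y)) (hc : PvChain parent y p) : PvChain parent x (p ++ [x])

-- invariant tying A's loop state to B's: visited is exactly parent's key list, and the
-- two queues agree position-wise, B storing each node with its (duplicate-free) parent-chain path
def PvInv (parent : PySem.Dict (Int × String) (Option (Int × String)))
    (visited : PySem.Set (Int × String)) (qA : List (Int × String))
    (qB : List ((Int × String) × List (Int × String))) : Prop :=
  visited = parent.keys ∧ parent.keys.Nodup ∧
  List.Forall₂ (fun x pr => pr.1 = x ∧ PvChain parent x pr.2 ∧ pr.2.Nodup ∧ pr.2 ⊆ parent.keys) qA qB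

theorem pvChain_stable {parent : PySem.Dict (Int × String) (Option (Int × String))}
    {k : Int × String} {v : Option (Int × String)} (hk : parent.get? k = none)
    {x : Int × String} {p : List (Int × String)} (h : PvChain parent x p) :
    PvChain (parent.insert k v) x p := by
  induction h with
  | root y hy =>
      exact PvChain.root y (by rw [PySem.Dict.get?_insert_of_ne _ v (fun he => by simp [he, hk] at hy)]; exact hy)
  | step a b q ha _ ih =>
      exact PvChain.step a b q (by rw [PySem.Dict.get?_insert_of_ne _ v (fun he => by simp [he, hk] at ha)]; exact ha) ih

theorem pvBuildPath_eq {parent : PySem.Dict (Int × String) (Option (Int × String))}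
    {x : Int × String} {p : List (Int × String)} (h : PvChain parent x p) :
    ∀ fuel acc, p.length ≤ fuel →
      pvBuildPath parent fuel (some x) acc = acc ++ p.reverse := by
  induction h with
  | root y hy =>
      intro fuel acc hf
      cases fuel with
      | zero => simp at hf
      | succ f => simp [pvBuildPath, hy]
  | step a b q ha _ ih =>
      intro fuel acc hf
      cases fuel with
      | zero => simp at hf
      | succ f =>
        have hq : q.length ≤ f := by simp at hf; omega
        simp [pvBuildPath, ha, ih f (acc ++ [a]) hq]

theorem pvFold_inv (cur : Int × String) (p : List (Int × String)) :
    ∀ (ns qA : List (Int × String)) (qB : List ((Int × String) × List (Int × String)))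
      (parent : PySem.Dict (Int × String) (Option (Int × String)))
      (visited : PySem.Set (Int × String)),
      PvInv parent visited qA qB → PvChain parent cur p → p.Nodup → p ⊆ parent.keys →
      (ns.foldl (fun st nxt =>
          if PySem.Set.contains st.2.2 nxt then st
          else (st.1 ++ [nxt], st.2.1.insert nxt (some cur), PySem.Set.add st.2.2 nxt))
        (qA, parent, visited)).2.2
        = (ns.foldl (fun st nxt =>
            if PySem.Set.contains st.2 nxt then st
            else (st.1 ++ [(nxt, p ++ [nxt])], PySem.Set.add st.2 nxt)) (qB, visited)).2 ∧
      PvInv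
        (ns.foldl (fun st nxt =>
          if PySem.Set.contains st.2.2 nxt then st
          else (st.1 ++ [nxt], st.2.1.insert nxt (some cur), PySem.Set.add st.2.2 nxt))
        (qA, parent, visited)).2.1
        (ns.foldl (fun st nxt =>
          if PySem.Set.contains st.2.2 nxt then st
          else (st.1 ++ [nxt], st.2.1.insert nxt (some cur), PySem.Set.add st.2.2 nxt))
        (qA, parent, visited)).2.2
        (ns.foldl (fun st nxt =>
          if PySem.Set.contains st.2.2 nxt then st
          else (st.1 ++ [nxt], st.2.1.insert nxt (some cur), PySem.Set.add st.2.2 nxt))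
        (qA, parent, visited)).1
        (ns.foldl (fun st nxt =>
            if PySem.Set.contains st.2 nxt then st
            else (st.1 ++ [(nxt, p ++ [nxt])], PySem.Set.add st.2 nxt)) (qB, visited)).1 := by
  intro ns
  induction ns with
  | nil => intro qA qB parent visited hinv _ _ _; exact ⟨hinv.1 ▸ rfl, hinv⟩
  | cons nxt ns ih =>
    intro qA qB parent visited hinv hc hnd hsub
    obtain ⟨hvis, hkeys, hq⟩ := hinv
    by_cases hmem : PySem.Set.contains visited nxt = true
    · simp only [List.foldl_cons, hmem, if_pos]
      exact ih qA qB parent visited ⟨hvis, hkeys, hq⟩ hc hnd hsub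
    · have hmem' : nxt ∉ parent.keys := by
        intro hin
        exact hmem (by simpa [PySem.Set.contains, hvis] using hin)
      have hcont : parent.contains nxt = false := by
        rw [PySem.Dict.contains_eq_decide_mem_keys]; simpa using hmem'
      have hget : parent.get? nxt = none :=
        (PySem.Dict.get?_eq_none_iff_not_mem_keys parent nxt).mpr hmem'
      have hkeys' : (parent.insert nxt (some cur)).keys = parent.keys ++ [nxt] :=
        PySem.Dict.keys_insert_of_not_contains parent (some cur) hcont
      have hnm : nxt ∉ visited := by simpa using hmem
      have hadd : PySem.Set.add visited nxt = visited ++ [nxt] := by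
        simp [PySem.Set.add, hnm]
      simp only [List.foldl_cons, hmem, if_neg, Bool.false_eq_true, not_false_iff]
      apply ih
      · refine ⟨by rw [hadd, hvis, hkeys'], ?_, ?_⟩
        · rw [hkeys']
          refine List.Nodup.append hkeys (List.nodup_singleton _) ?_
          intro a ha hb
          simp at hb
          exact hmem' (hb ▸ ha)
        · refine List.rel_append ?_ ?_
          · refine hq.imp ?_
            rintro x ⟨n, pp⟩ ⟨h1, h2, h3, h4⟩
            exact ⟨h1, pvChain_stable hget h2, h3, fun a ha => by rw [hkeys']; exact List.mem_append_left _ (h4 ha)⟩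
          · refine List.forall₂_cons.mpr ⟨⟨rfl, ?_, ?_, ?_⟩, List.Forall₂.nil⟩
            · exact PvChain.step nxt cur p (PySem.Dict.get?_insert_self _ _ _) (pvChain_stable hget hc)
            · refine List.Nodup.append hnd (List.nodup_singleton _) ?_
              intro a ha hb
              simp at hb
              exact hmem' (hb ▸ hsub ha)
            · rw [hkeys']; exact List.append_subset.mpr ⟨fun a ha => List.mem_append_left _ (hsub ha), by simp⟩
      · exact pvChain_stable hget hc
      · exact hnd
      · intro a ha; rw [hkeys']; exact List.mem_append_left _ (hsub ha)

theorem pvLoop_eq (accepting : List String) (ts : List (Int × String × List (Int × String))) :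
    ∀ (fuel : Nat) (qA : List (Int × String)) (qB : List ((Int × String) × List (Int × String)))
      (parent : PySem.Dict (Int × String) (Option (Int × String)))
      (visited : PySem.Set (Int × String)),
      PvInv parent visited qA qB →
      pvLoopA accepting ts fuel qA parent visited = pvLoopB accepting ts fuel qB visited := by
  intro fuel
  induction fuel with
  | zero => intro _ _ _ _ _; rfl
  | succ f ih =>
    intro qA qB parent visited hinv
    obtain ⟨hvis, hkeys, hq⟩ := hinv
    cases hq with
    | nil => rfl
    | @cons x pr qA' qB' hR hrest =>
      obtain ⟨node, path⟩ := pr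
      obtain ⟨h1, h2, h3, h4⟩ := hR
      simp only at h1 h2 h3 h4
      subst h1
      by_cases hacc : accepting.contains node.2 = true
      · have hlen : path.length ≤ parent.size + 1 := by
          have hle := List.Subperm.length_le (List.Nodup.subperm h3 h4)
          have hsz : parent.keys.length = parent.size := by
            simp [PySem.Dict.keys, PySem.Dict.size]
          omega
        have hacc' : node.2 ∈ accepting := by simpa using hacc
        simp [pvLoopA, pvLoopB, hacc', pvBuildPath_eq h2 (parent.size + 1) [] hlen]
      · simp only [pvLoopA, pvLoopB, hacc, Bool.false_eq_true, if_neg, not_false_iff]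
        obtain ⟨hv, hinv'⟩ := pvFold_inv node path (pvTransGet ts node) qA' qB' parent visited ⟨hvis, hkeys, hrest⟩ h2 h3 h4
        rw [← hv]
        exact ih _ _ _ _ hinv'

-- ===== VERDICT (by name: the statement is the Claim_ definition above) =====
theorem find_shortest_path_to_accepting_spec : Claim_equal_find_shortest_path_to_accepting := by
  intro cps accepting ts _
  show _ = _
  unfold find_shortest_path_to_accepting find_shortest_path_to_accepting_alt
  apply pvLoop_eq
  have hget : (PySem.Dict.empty.insert cps (none : Option (Int × String))).get? cps = some none :=
    PySem.Dict.get?_insert_self _ _ _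
  have hkeys : (PySem.Dict.empty.insert cps (none : Option (Int × String))).keys = [cps] := by
    rw [PySem.Dict.keys_insert_of_not_contains _ _ (by simp [pysem])]
    simp [pysem]
  refine ⟨by simp [PySem.Set.ofList, PySem.Set.add, hkeys, PySem.Set.empty], by rw [hkeys]; exact List.nodup_singleton _, ?_⟩
  exact List.forall₂_cons.mpr ⟨⟨rfl, PvChain.root cps hget, List.nodup_singleton _, by simp [hkeys]⟩, List.Forall₂.nil⟩
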